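-- pv_equiv track=rewrite | github.com/drewsavino/drewsavino-s-polymarket-microscalper | markets.py | _extract_token_ids
-- ===== SOURCE A (Python) =====
-- def _extract_token_ids(market: dict) -> tuple[str | None, str | None]:
--     """Extract YES and NO token IDs from market data."""
--     yes_tid, no_tid = None, None
--     for token in market.get("tokens", []):
--         outcome = token.get("outcome", "").upper()
--         tid = token.get("token_id") or token.get("tokenId")
--         if outcome == "YES":
--             yes_tid = tid
--         elif outcome == "NO":
--             no_tid = tid
--     return yes_tid, no_tid
-- ===== SOURCE B (Python) =====
-- def _extract_token_ids(market: dict) -> tuple: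
--     """Extract YES and NO token IDs from market data."""
--     def _find(label):
--         # last matching token wins, so search from the back and stop early
--         for t in reversed(market.get("tokens", [])):
--             if t.get("outcome", "").upper() == label:
--                 return t.get("token_id") or t.get("tokenId")
--         return None
--     return _find("YES"), _find("NO")
-- ===== Notes on version B (the rewrite author's own statement) =====
-- stated objective: alternative
-- what changed: Replaces the single forward pass with an if/elif accumulator pair by two independent early-exit backward searches (reversed iteration), one per label; last-wins comes from the reversal instead of overwriting.
import Mathlib
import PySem

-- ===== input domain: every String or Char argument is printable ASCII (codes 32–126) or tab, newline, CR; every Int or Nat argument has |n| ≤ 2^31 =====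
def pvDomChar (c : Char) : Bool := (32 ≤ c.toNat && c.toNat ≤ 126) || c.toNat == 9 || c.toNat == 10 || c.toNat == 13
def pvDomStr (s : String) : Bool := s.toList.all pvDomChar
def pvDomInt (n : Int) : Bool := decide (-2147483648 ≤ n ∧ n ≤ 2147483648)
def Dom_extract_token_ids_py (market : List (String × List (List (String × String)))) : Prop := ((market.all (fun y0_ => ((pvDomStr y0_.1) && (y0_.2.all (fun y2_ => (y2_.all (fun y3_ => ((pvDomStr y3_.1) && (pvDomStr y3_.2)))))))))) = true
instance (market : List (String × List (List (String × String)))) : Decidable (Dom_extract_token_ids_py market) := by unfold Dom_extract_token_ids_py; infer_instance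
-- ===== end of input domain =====

-- B replaces A's single forward pass with an if/elif accumulator pair by two independent
-- early-exit backward searches (one per label), last-wins via reversal; objective: alternative.

-- ===== PORT A =====
-- t.get("token_id") or t.get("tokenId")  ('' and None are falsy)
def pvTid (t : PySem.Dict String String) : Option String :=
  match t.get? "token_id" with
  | some s => if s = "" then t.get? "tokenId" else some s
  | none => t.get? "tokenId"

def extract_token_ids_py (market : List (String × List (List (String × String)))) : Option String × Option String :=
  let tokens := (PySem.Dict.mk market).getD "tokens" []
  tokens.foldl (fun st tok =>
    let t := PySem.Dict.mk tok
    let outcome := PySem.Str.upper (t.getD "outcome" "")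
    let tid := pvTid t
    if outcome = "YES" then (tid, st.2)
    else if outcome = "NO" then (st.1, tid)
    else st) (none, none)

-- ===== PORT B =====
-- _find(label): walk the reversed token list, return the resolved tid at the first match
def pvFind (label : String) : List (List (String × String)) → Option String
  | [] => none
  | tok :: rest =>
    let t := PySem.Dict.mk tok
    if PySem.Str.upper (t.getD "outcome" "") = label then pvTid t
    else pvFind label rest

def extract_token_ids_py_alt (market : List (String × List (List (String × String)))) : Option String × Option String :=
  let tokens := (PySem.Dict.mk market).getD "tokens" []
  (pvFind "YES" tokens.reverse, pvFind "NO" tokens.reverse)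

-- ===== PRECONDITION & SPEC =====
def Spec_extract_token_ids_py (market : List (String × List (List (String × String)))) (out : Option String × Option String) : Prop := out = extract_token_ids_py_alt market
instance (market : List (String × List (List (String × String)))) (out : Option String × Option String) : Decidable (Spec_extract_token_ids_py market out) := by unfold Spec_extract_token_ids_py; infer_instance

-- ===== CLAIM (what is proved, stated in full; the proofs are below) =====
def Claim_equal_extract_token_ids_py : Prop := ∀ (market : List (String × List (List (String × String)))), Dom_extract_token_ids_py market → Spec_extract_token_ids_py market (extract_token_ids_py market)

-- ===== LEMMAS AND PROOFS =====

-- pvFind with an explicit fallback value, used only in the proof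
def pvFindD (label : String) (d : Option String) : List (List (String × String)) → Option String
  | [] => d
  | tok :: rest =>
    let t := PySem.Dict.mk tok
    if PySem.Str.upper (t.getD "outcome" "") = label then pvTid t
    else pvFindD label d rest

lemma pvFindD_none (label : String) (ts : List (List (String × String))) :
    pvFindD label none ts = pvFind label ts := by
  induction ts with
  | nil => rfl
  | cons tok rest ih => simp [pvFindD, pvFind, ih]

lemma pvFindD_append (label : String) (d : Option String)
    (xs ys : List (List (String × String))) :
    pvFindD label d (xs ++ ys) = pvFindD label (pvFindD label d ys) xs := by
  induction xs with
  | nil => rfl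
  | cons tok rest ih => simp [pvFindD, ih]

-- A's accumulator after the loop = backward search with the accumulator as fallback
lemma pv_loop (ts : List (List (String × String))) (st : Option String × Option String) :
    ts.foldl (fun st tok =>
      let t := PySem.Dict.mk tok
      let outcome := PySem.Str.upper (t.getD "outcome" "")
      let tid := pvTid t
      if outcome = "YES" then (tid, st.2)
      else if outcome = "NO" then (st.1, tid)
      else st) st
    = (pvFindD "YES" st.1 ts.reverse, pvFindD "NO" st.2 ts.reverse) := by
  induction ts generalizing st with
  | nil => rfl
  | cons tok rest ih =>
    simp only [List.foldl_cons, List.reverse_cons, pvFindD_append, ih]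
    congr 1
    · by_cases hy : PySem.Str.upper ((PySem.Dict.mk tok).getD "outcome" "") = "YES"
      · simp [pvFindD, hy]
      · by_cases hn : PySem.Str.upper ((PySem.Dict.mk tok).getD "outcome" "") = "NO"
        · simp [pvFindD, hn]
        · simp [pvFindD, hy, hn]
    · by_cases hy : PySem.Str.upper ((PySem.Dict.mk tok).getD "outcome" "") = "YES"
      · simp [pvFindD, hy]
      · by_cases hn : PySem.Str.upper ((PySem.Dict.mk tok).getD "outcome" "") = "NO"
        · simp [pvFindD, hn]
        · simp [pvFindD, hy, hn]

-- ===== VERDICT (by name: the statement is the Claim_ definition above) =====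
theorem extract_token_ids_py_spec : Claim_equal_extract_token_ids_py := by
  intro market _
  unfold Spec_extract_token_ids_py extract_token_ids_py extract_token_ids_py_alt
  simp only [pv_loop, pvFindD_none]
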